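-- pv_equiv track=rewrite | github.com/OanaBtz/compilerNew | AFPExtractor.py | getLinebreaks
-- ===== SOURCE A (Python) =====
-- def getLinebreaks(column):
--     linebreaks = [];
--     add = False;
--     string = "";
--     for c in column:
--         string += c;
--         if (len(string) == 2):
--             if (add):
--                 lb = int(string, 16);
--                 if (lb == 255):
--                     break;
--                 linebreaks.append(lb);
--             add = not add;
--             string = "";
--     return linebreaks;
-- ===== SOURCE B (Python) =====
-- def getLinebreaks(column):
--     linebreaks = []
--     for i in range(2, len(column) - 1, 4):
--         lb = int(column[i:i+2], 16)
--         if lb == 255: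
--             break
--         linebreaks.append(lb)
--     return linebreaks
-- ===== Notes on version B (the rewrite author's own statement) =====
-- stated objective: simpler
-- what changed: Replaces the character-by-character loop with its stateful boolean toggle and two-character string accumulator by a single strided index loop that jumps directly to every second complete pair (indices 2, 6, 10, ...) and decodes it; it visits half the characters and builds no intermediate strings per character.
import Mathlib
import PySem

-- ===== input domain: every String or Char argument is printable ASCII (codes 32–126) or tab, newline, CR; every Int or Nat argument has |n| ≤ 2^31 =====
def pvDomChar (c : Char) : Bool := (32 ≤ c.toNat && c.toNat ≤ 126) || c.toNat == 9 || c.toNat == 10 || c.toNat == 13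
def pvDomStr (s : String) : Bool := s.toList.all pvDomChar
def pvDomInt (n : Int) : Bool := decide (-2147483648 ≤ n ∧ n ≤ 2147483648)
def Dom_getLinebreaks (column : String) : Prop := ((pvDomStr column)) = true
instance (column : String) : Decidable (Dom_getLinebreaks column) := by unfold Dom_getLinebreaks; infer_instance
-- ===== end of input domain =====

-- B replaces A's char-by-char loop with its boolean skip-toggle and 2-char accumulator by one
-- strided index loop over the pair positions 2, 6, 10, … (objective: simpler).

-- ===== PORT A =====
-- loop over the characters, carrying the list, the toggle and the buffer; int(string,16) = none is a
-- ValueError (A raises there; excluded by Pre_, the port returns the accumulator so far)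
def goA : List Char → List Int → Bool → List Char → List Int
  | [], acc, _, _ => acc
  | c :: rest, acc, add, buf =>
    let s := buf ++ [c]
    if s.length = 2 then
      if add then
        match PySem.Int.ofCharsBase? s 16 with
        | none => acc
        | some lb => if lb = 255 then acc else goA rest (acc ++ [lb]) (!add) []
      else goA rest acc (!add) []
    else goA rest acc add s

def getLinebreaks (column : String) : List Int := goA column.toList [] false []

-- ===== PORT B =====
-- loop over range(2, len(column)-1, 4); each step decodes column[i:i+2] (none = ValueError,
-- outside Pre_; the port returns the accumulator so far)
def goB : List Int → List Char → List Int → List Int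
  | [], _, acc => acc
  | i :: rest, cs, acc =>
    match PySem.Int.ofCharsBase? (PySem.List.slice cs (some i) (some (i + 2))) 16 with
    | none => acc
    | some lb => if lb = 255 then acc else goB rest cs (acc ++ [lb])

def getLinebreaks_alt (column : String) : List Int :=
  goB (PySem.List.pyRange 2 ((column.toList.length : Int) - 1) 4) column.toList []

-- ===== PRECONDITION & SPEC =====
-- the Option results of decoding the pairs A decodes, in order
def pvDecoded (cs : List Char) : List (Option Int) :=
  (PySem.List.pyRange 2 ((cs.length : Int) - 1) 4).map
    (fun i => PySem.Int.ofCharsBase? (PySem.List.slice cs (some i) (some (i + 2))) 16)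

-- Pre_ excludes exactly the inputs where A raises ValueError: a decoded two-character pair
-- that is not a valid hexadecimal int literal occurring before the first pair decoding to 255.
def Pre_getLinebreaks (column : String) : Prop :=
  (((pvDecoded column.toList).takeWhile (fun o => o ≠ some (255 : Int))).all
    (fun o => o.isSome)) = true
instance (column : String) : Decidable (Pre_getLinebreaks column) := by
  unfold Pre_getLinebreaks; infer_instance

def pvWitness_getLinebreaks : String := "0a1b2c3d"

def Spec_getLinebreaks (column : String) (out : List Int) : Prop := out = getLinebreaks_alt column
instance (column : String) (out : List Int) : Decidable (Spec_getLinebreaks column out) := by unfold Spec_getLinebreaks; infer_instance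

-- ===== CLAIM (what is proved, stated in full; the proofs are below) =====
def Claim_equal_getLinebreaks : Prop := ∀ (column : String), Dom_getLinebreaks column → Pre_getLinebreaks column → Spec_getLinebreaks column (getLinebreaks column)

-- ===== LEMMAS AND PROOFS =====

theorem pyRange4_nil {a b : Int} (h : b ≤ a) : PySem.List.pyRange a b 4 = [] := by
  rw [PySem.List.pyRange_of_pos a b (by norm_num)]
  simp [show ¬ a < b by omega]

theorem pyRange4_cons {a b : Int} (h : a < b) :
    PySem.List.pyRange a b 4 = a :: PySem.List.pyRange (a + 4) b 4 := by
  rw [PySem.List.pyRange_of_pos a b (by norm_num),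
      PySem.List.pyRange_of_pos (a + 4) b (by norm_num)]
  have hcount : (if a < b then ((b - a + 4 - 1) / 4).toNat else 0)
      = (if a + 4 < b then ((b - (a + 4) + 4 - 1) / 4).toNat else 0) + 1 := by
    split_ifs <;> omega
  rw [hcount, List.range_succ_eq_map]
  simp only [List.map_cons, List.map_map]
  congr 1
  · simp
  · apply List.map_congr_left
    intro k _
    simp [Nat.succ_eq_add_one, Function.comp]
    ring

theorem pyRange4_shift (a b : Int) :
    PySem.List.pyRange (a + 4) (b + 4) 4 = (PySem.List.pyRange a b 4).map (· + 4) := by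
  rw [PySem.List.pyRange_of_pos a b (by norm_num),
      PySem.List.pyRange_of_pos (a + 4) (b + 4) (by norm_num)]
  rw [List.map_map]
  have : (if a + 4 < b + 4 then ((b + 4 - (a + 4) + 4 - 1) / 4).toNat else 0)
      = (if a < b then ((b - a + 4 - 1) / 4).toNat else 0) := by split_ifs <;> omega
  rw [this]
  apply List.map_congr_left
  intro k _
  simp [Function.comp]
  ring

theorem goB_shift (idxs : List Int) (a b c d : Char) (cs : List Char) (acc : List Int)
    (hnn : ∀ i ∈ idxs, 0 ≤ i) :
    goB (idxs.map (· + 4)) (a :: b :: c :: d :: cs) acc = goB idxs cs acc := by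
  induction idxs generalizing acc with
  | nil => rfl
  | cons i rest ih =>
    have hi : 0 ≤ i := hnn i (by simp)
    have hslice : PySem.List.slice (a :: b :: c :: d :: cs) (some (i + 4)) (some (i + 4 + 2))
        = PySem.List.slice cs (some i) (some (i + 2)) := by
      rw [PySem.List.slice_toNat _ (by omega) (by omega),
          PySem.List.slice_toNat _ (by omega) (by omega)]
      have h4 : (i + 4).toNat = i.toNat + 4 := by omega
      have h6 : (i + 4 + 2).toNat = i.toNat + 6 := by omega
      have h2 : (i + 2).toNat = i.toNat + 2 := by omega
      rw [h4, h6, h2]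
      have hdrop : (a :: b :: c :: d :: cs).drop (i.toNat + 4) = cs.drop i.toNat := by
        rw [Nat.add_comm, ← List.drop_drop]
        rfl
      rw [hdrop]
      congr 1
      omega
    simp only [List.map_cons, goB, hslice]
    cases PySem.Int.ofCharsBase? (PySem.List.slice cs (some i) (some (i + 2))) 16 with
    | none => rfl
    | some lb =>
      by_cases h255 : lb = 255
      · simp [h255]
      · simp only [if_neg h255]
        exact ih (acc ++ [lb]) (fun j hj => hnn j (List.mem_cons_of_mem _ hj))

theorem mem_pyRange4_nonneg {b i : Int} (h : i ∈ PySem.List.pyRange 2 b 4) : 0 ≤ i := by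
  have := (PySem.List.mem_pyRange_iff_of_pos (a := 2) (b := b) (s := 4) (by norm_num) i).mp h
  omega

theorem goA_eq_goB (n : Nat) : ∀ (cs : List Char) (acc : List Int), cs.length ≤ n →
    goA cs acc false [] = goB (PySem.List.pyRange 2 ((cs.length : Int) - 1) 4) cs acc := by
  induction n using Nat.strong_induction_on with
  | _ n ih =>
    intro cs acc hlen
    match cs with
    | [] => simp [goA, pyRange4_nil (by norm_num : (-1 : Int) ≤ 2), goB]
    | [a] => simp [goA, pyRange4_nil (by norm_num : (0 : Int) ≤ 2), goB]
    | [a, b] => simp [goA, pyRange4_nil (by norm_num : (1 : Int) ≤ 2), goB]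
    | [a, b, c] => simp [goA, pyRange4_nil (by norm_num : (2 : Int) ≤ 2), goB]
    | a :: b :: c :: d :: rest =>
      have hn : rest.length + 4 ≤ n := by simp at hlen; omega
      -- unfold A's four character steps
      have hA : goA (a :: b :: c :: d :: rest) acc false []
          = match PySem.Int.ofCharsBase? [c, d] 16 with
            | none => acc
            | some lb => if lb = 255 then acc else goA rest (acc ++ [lb]) false [] := by
        simp [goA]
      -- the range starts with 2 and the slice at 2 is [c, d]
      have hlen4 : ((a :: b :: c :: d :: rest).length : Int) - 1
          = ((rest.length : Int) - 1) + 4 := by simp; omega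
      have hcons : PySem.List.pyRange 2 (((a :: b :: c :: d :: rest).length : Int) - 1) 4
          = 2 :: PySem.List.pyRange 6 (((rest.length : Int) - 1) + 4) 4 := by
        rw [hlen4, pyRange4_cons (by omega)]
        norm_num
      have hslice2 : PySem.List.slice (a :: b :: c :: d :: rest) (some 2) (some (2 + 2))
          = [c, d] := by
        rw [PySem.List.slice_toNat _ (by norm_num) (by norm_num)]
        rfl
      have hshift : goB (PySem.List.pyRange 6 (((rest.length : Int) - 1) + 4) 4)
            (a :: b :: c :: d :: rest)
          = goB (PySem.List.pyRange 2 ((rest.length : Int) - 1) 4) rest := by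
        funext acc'
        have h6 : PySem.List.pyRange 6 (((rest.length : Int) - 1) + 4) 4
            = (PySem.List.pyRange 2 ((rest.length : Int) - 1) 4).map (· + 4) := by
          have := pyRange4_shift 2 ((rest.length : Int) - 1)
          simpa using this
        rw [h6]
        exact goB_shift _ a b c d rest acc' (fun i hi => mem_pyRange4_nonneg hi)
      rw [hA, hcons]
      simp only [goB, hslice2]
      cases PySem.Int.ofCharsBase? [c, d] 16 with
      | none => rfl
      | some lb =>
        by_cases h255 : lb = 255
        · simp [h255]
        · simp only [if_neg h255]
          rw [hshift]
          exact ih (rest.length) (by omega) rest (acc ++ [lb]) (le_refl _)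

-- ===== VERDICT (by name: the statement is the Claim_ definition above) =====
theorem getLinebreaks_spec : Claim_equal_getLinebreaks := by
  intro column _ _
  unfold Spec_getLinebreaks getLinebreaks getLinebreaks_alt
  exact goA_eq_goB column.toList.length column.toList [] (le_refl _)
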